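-- pv_equiv track=rewrite | github.com/chengjunyan1/Modular-Robot-System | Planner/MFSC.py | correctCSC
-- ===== SOURCE A (Python) =====
-- def correctCSC(m):
--     mapping={}
--     for i in m:
--         vp1=i[0]
--         vp2=i[1]
--         vt1=i[2]
--         vt2=i[3]
--         if vp1 not in mapping:
--             mapping[vp1]=vt1
--         else:
--             if mapping[vp1]!=vt1:
--                 return False
--         if vp2 not in mapping:
--             mapping[vp2]=vt2
--         else:
--             if mapping[vp2]!=vt2:
--                 return False
--     return True
-- ===== SOURCE B (Python) =====
-- def correctCSC(m):
--     # Flatten to (vertex, type) assertions, then check every assertion against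
--     # the first type asserted for its vertex.  Order-independent, no mapping state.
--     pairs = [p for i in m for p in ((i[0], i[2]), (i[1], i[3]))]
--     return all(t == [ft for fv, ft in pairs if fv == v][0] for v, t in pairs)
-- ===== Notes on version B (the rewrite author's own statement) =====
-- stated objective: simpler
-- what changed: Replaced the stateful dict-building loop with early returns by a stateless two-liner: flatten the rows into (vertex,type) assertions and check each assertion against the first type asserted for its vertex.
import Mathlib
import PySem

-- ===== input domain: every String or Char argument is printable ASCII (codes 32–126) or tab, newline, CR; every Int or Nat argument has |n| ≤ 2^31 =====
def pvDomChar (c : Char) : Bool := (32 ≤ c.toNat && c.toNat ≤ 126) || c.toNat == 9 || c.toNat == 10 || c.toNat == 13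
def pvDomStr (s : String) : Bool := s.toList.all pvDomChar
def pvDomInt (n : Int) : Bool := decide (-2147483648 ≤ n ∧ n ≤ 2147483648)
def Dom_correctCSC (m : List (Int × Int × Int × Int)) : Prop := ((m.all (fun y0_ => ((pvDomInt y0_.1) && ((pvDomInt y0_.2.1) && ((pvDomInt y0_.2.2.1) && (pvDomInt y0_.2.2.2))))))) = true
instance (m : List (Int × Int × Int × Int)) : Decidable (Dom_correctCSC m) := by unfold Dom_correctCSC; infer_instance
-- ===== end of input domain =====

-- B replaces A's stateful mapping-building loop by a stateless check of every
-- (vertex, type) assertion against the first type asserted for its vertex (objective: simpler).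

-- ===== PORT A =====
-- A's loop over rows: 'vp not in mapping' → ¬ contains; 'mapping[vp]' → getD (the key
-- is always present at that read, so the default 0 is never the result).
def correctCSC_goA (d : PySem.Dict Int Int) : List (Int × Int × Int × Int) → Bool
  | [] => true
  | i :: rest =>
    let vp1 := i.1
    let vp2 := i.2.1
    let vt1 := i.2.2.1
    let vt2 := i.2.2.2
    if ¬ d.contains vp1 then
      let d1 := d.insert vp1 vt1
      if ¬ d1.contains vp2 then correctCSC_goA (d1.insert vp2 vt2) rest
      else if d1.getD vp2 0 ≠ vt2 then false
      else correctCSC_goA d1 rest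
    else if d.getD vp1 0 ≠ vt1 then false
    else if ¬ d.contains vp2 then correctCSC_goA (d.insert vp2 vt2) rest
    else if d.getD vp2 0 ≠ vt2 then false
    else correctCSC_goA d rest

def correctCSC (m : List (Int × Int × Int × Int)) : Bool :=
  correctCSC_goA PySem.Dict.empty m

-- ===== PORT B =====
-- pairs = [p for i in m for p in ((i[0], i[2]), (i[1], i[3]))]
def correctCSC_pairs (m : List (Int × Int × Int × Int)) : List (Int × Int) :=
  m.flatMap (fun i => [(i.1, i.2.2.1), (i.2.1, i.2.2.2)])

-- [ft for fv, ft in pairs if fv == v][0]; the [0] index never raises in B, because the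
-- pair (v, t) under test is itself in `pairs`, so the `none` of pyGet? is unreachable.
def correctCSC_firstTy (ps : List (Int × Int)) (v : Int) : Option Int :=
  PySem.List.pyGet? ((ps.filter (fun q => q.1 == v)).map (·.2)) 0

def correctCSC_alt (m : List (Int × Int × Int × Int)) : Bool :=
  let pairs := correctCSC_pairs m
  pairs.all (fun p => correctCSC_firstTy pairs p.1 == some p.2)

-- ===== PRECONDITION & SPEC =====
def Spec_correctCSC (m : List (Int × Int × Int × Int)) (out : Bool) : Prop := out = correctCSC_alt m
instance (m : List (Int × Int × Int × Int)) (out : Bool) : Decidable (Spec_correctCSC m out) := by unfold Spec_correctCSC; infer_instance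

-- ===== CLAIM (what is proved, stated in full; the proofs are below) =====
def Claim_equal_correctCSC : Prop := ∀ (m : List (Int × Int × Int × Int)), Dom_correctCSC m → Spec_correctCSC m (correctCSC m)

-- ===== LEMMAS AND PROOFS =====

lemma pv_all_congr {α : Type} (l : List α) (p q : α → Bool) (h : ∀ x ∈ l, p x = q x) :
    l.all p = l.all q := by
  induction l with
  | nil => rfl
  | cons a l ih => simp only [List.all_cons, h a (by simp), ih fun x hx => h x (by simp [hx])]

lemma correctCSC_firstTy_cons (p : Int × Int) (ps : List (Int × Int)) (v : Int) :
    correctCSC_firstTy (p :: ps) v =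
      if p.1 = v then some p.2 else correctCSC_firstTy ps v := by
  simp only [correctCSC_firstTy, List.filter_cons]
  split_ifs with h <;> simp_all [PySem.List.pyGet?, PySem.List.pyIdx?]

-- A's loop rephrased one (vertex, type) assertion at a time.
def correctCSC_loopA (d : PySem.Dict Int Int) : List (Int × Int) → Bool
  | [] => true
  | p :: ps =>
    if ¬ d.contains p.1 then correctCSC_loopA (d.insert p.1 p.2) ps
    else if d.getD p.1 0 ≠ p.2 then false
    else correctCSC_loopA d ps

lemma correctCSC_goA_eq_loopA (rows : List (Int × Int × Int × Int)) (d : PySem.Dict Int Int) :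
    correctCSC_goA d rows = correctCSC_loopA d (correctCSC_pairs rows) := by
  induction rows generalizing d with
  | nil => rfl
  | cons i rest ih =>
    simp only [correctCSC_goA, correctCSC_pairs, List.flatMap_cons, List.cons_append,
      List.nil_append, correctCSC_loopA]
    split_ifs <;> first | rfl | exact ih _

-- A's single-assertion loop, as the "matches the first asserted type" check,
-- where the mapping d records the types already committed to.
lemma correctCSC_loopA_eq (ps : List (Int × Int)) (d : PySem.Dict Int Int) :
    correctCSC_loopA d ps =
      ps.all (fun p =>
        if d.contains p.1 then d.getD p.1 0 == p.2
        else correctCSC_firstTy ps p.1 == some p.2) := by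
  induction ps generalizing d with
  | nil => rfl
  | cons p ps ih =>
    simp only [correctCSC_loopA, List.all_cons]
    by_cases h1 : d.contains p.1
    · rw [if_neg (not_not_intro h1), if_pos h1]
      by_cases hx : d.getD p.1 0 = p.2
      · rw [if_neg (fun hc => hc hx), ih]
        simp only [hx, beq_self_eq_true, Bool.true_and]
        refine pv_all_congr _ _ _ (fun q hq => ?_)
        by_cases h2 : d.contains q.1
        · rw [if_pos h2, if_pos h2]
        · have hv : p.1 ≠ q.1 := fun h => h2 (h ▸ h1)
          rw [if_neg h2, if_neg h2, correctCSC_firstTy_cons, if_neg hv]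
      · rw [if_pos hx]
        simp [hx]
    · rw [if_pos h1, if_neg h1, ih, correctCSC_firstTy_cons, if_pos rfl]
      simp only [beq_self_eq_true, Bool.true_and]
      refine pv_all_congr _ _ _ (fun q hq => ?_)
      by_cases hv : q.1 = p.1
      · rw [hv, PySem.Dict.contains_insert_self, if_pos rfl, PySem.Dict.getD_insert_self,
          if_neg (hv ▸ h1), correctCSC_firstTy_cons, if_pos rfl]
        simp
      · rw [PySem.Dict.contains_insert, beq_eq_false_iff_ne.mpr hv, Bool.false_or,
          PySem.Dict.getD_insert_of_ne d p.2 0 hv]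
        by_cases h2 : d.contains q.1
        · rw [if_pos h2, if_pos h2]
        · rw [if_neg h2, if_neg h2, correctCSC_firstTy_cons,
            if_neg (fun h => hv h.symm)]

theorem pv_main (m : List (Int × Int × Int × Int)) : correctCSC m = correctCSC_alt m := by
  rw [correctCSC, correctCSC_goA_eq_loopA, correctCSC_loopA_eq, correctCSC_alt]
  refine pv_all_congr _ _ _ (fun p hp => ?_)
  rw [PySem.Dict.contains_empty, if_neg (by simp)]

-- ===== VERDICT (by name: the statement is the Claim_ definition above) =====
theorem correctCSC_spec : Claim_equal_correctCSC := by
  intro m _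
  exact pv_main m
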